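-- pv_equiv track=rewrite | github.com/KSS095/TIL | 100_offline/월말평가_1차/python1_대전_4반_김승수.py | clean_log
-- ===== SOURCE A (Python) =====
-- def clean_log(text):
--     """
--     '_'가 포함된 경우 이를 ' '로 바꾸고,
--     각 단어의 첫 글자를 대문자로 바꾼다. (Title Case)
--     """
--     # replace method를 통해 '_' 를 ' '로 변환
--     clean_text = text.replace('_', ' ')
--
--     # split method를 통해 공백을 기준으로 단어 나누기
--     split_text = clean_text.split(' ')
--
--     # 나눈 단어들의 첫 단어를 대문자로 변환하여 저장할 리스트
--     capital_text = []
--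
--     # capitalize method를 통해 각 단어의 첫 글자를 대문자로 변환
--     for i in range(len(split_text)):
--         capitalize_text = split_text[i].capitalize()
--
--         # 변환한 문자열을 리스트에 저장
--         capital_text.append(capitalize_text)
--
--     # 리스트에 저장된 문자열들을 공백으로 연결
--     clean_capital_text = ' '.join(capital_text)
--     return clean_capital_text
-- ===== SOURCE B (Python) =====
-- def clean_log(text):
--     # Single pass: stream the chars, upper-casing the first letter after a
--     # word boundary, lower-casing the rest; no split/list-of-words/join.
--     s = text.replace('_', ' ')
--     out = []
--     start = True
--     for ch in s:
--         if ch == ' ':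
--             out.append(ch)
--             start = True
--         else:
--             out.append(ch.upper() if start else ch.lower())
--             start = False
--     return ''.join(out)
-- ===== Notes on version B (the rewrite author's own statement) =====
-- stated objective: alternative
-- what changed: Replaces split-into-words / capitalize-each / join with a single character-by-character scan that carries a start-of-word flag and upper/lower-cases each char as it streams.
import Mathlib
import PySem

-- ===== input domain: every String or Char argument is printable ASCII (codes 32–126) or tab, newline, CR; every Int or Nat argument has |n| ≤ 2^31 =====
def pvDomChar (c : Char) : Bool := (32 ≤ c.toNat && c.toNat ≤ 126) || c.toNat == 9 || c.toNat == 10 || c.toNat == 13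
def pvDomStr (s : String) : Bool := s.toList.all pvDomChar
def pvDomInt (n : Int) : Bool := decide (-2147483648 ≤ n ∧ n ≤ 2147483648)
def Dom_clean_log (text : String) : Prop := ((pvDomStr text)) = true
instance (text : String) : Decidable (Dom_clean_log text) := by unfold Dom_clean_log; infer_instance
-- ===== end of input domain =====

-- B replaces A's split/capitalize-each-word/join pipeline by a single streaming scan with a start-of-word flag; same O(n) cost.


-- ===== PORT A =====
-- str.capitalize, ported by hand (exact on the ASCII domain: first char upper-cased, rest lower-cased)
def pyCapitalize (s : List Char) : List Char :=
  match s with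
  | [] => []
  | c :: rest => PySem.Chars.upperChar c :: PySem.Chars.lower rest

def clean_log (text : String) : String :=
  let clean_text := PySem.Chars.replace text.toList ['_'] [' ']
  let split_text := PySem.Chars.splitOn clean_text [' ']
  let capital_text :=
    (PySem.List.pyRange 0 (PySem.List.len split_text) 1).foldl
      (fun acc i => acc ++ [pyCapitalize (PySem.List.pyGetD split_text i [])]) []
  String.ofList (PySem.Chars.join [' '] capital_text)

-- ===== PORT B =====
def clean_log_alt (text : String) : String :=
  let s := PySem.Chars.replace text.toList ['_'] [' ']
  let st := s.foldl
    (fun (st : List Char × Bool) ch =>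
      if ch = ' ' then (st.1 ++ [ch], true)
      else (st.1 ++ [if st.2 then PySem.Chars.upperChar ch else PySem.Chars.lowerChar ch], false))
    ([], true)
  String.ofList st.1

-- ===== PRECONDITION & SPEC =====
def Spec_clean_log (text : String) (out : String) : Prop := out = clean_log_alt text
instance (text : String) (out : String) : Decidable (Spec_clean_log text out) := by unfold Spec_clean_log; infer_instance

-- ===== CLAIM (what is proved, stated in full; the proofs are below) =====
def Claim_equal_clean_log : Prop := ∀ (text : String), Dom_clean_log text → Spec_clean_log text (clean_log text)

-- ===== LEMMAS AND PROOFS =====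

-- split(' ') on a char list as a simple structural recursion (cur = current word, reversed)
def mySplit : List Char → List Char → List (List Char)
  | [], cur => [cur.reverse]
  | c :: rest, cur => if c = ' ' then cur.reverse :: mySplit rest [] else mySplit rest (c :: cur)

-- B's scan as a structural recursion
def scanB : List Char → Bool → List Char
  | [], _ => []
  | c :: rest, flag =>
    if c = ' ' then ' ' :: scanB rest true
    else (if flag then PySem.Chars.upperChar c else PySem.Chars.lowerChar c) :: scanB rest false

theorem splitOn_go_eq (fuel : Nat) (l cur : List Char) (acc : List (List Char))
    (h : l.length ≤ fuel) :
    PySem.Chars.splitOn.go [' '] fuel l cur acc = acc.reverse ++ mySplit l cur := by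
  induction fuel generalizing l cur acc with
  | zero =>
    have hl : l = [] := by cases l <;> simp_all
    subst hl
    simp [PySem.Chars.splitOn.go, mySplit]
  | succ n ih =>
    cases l with
    | nil => simp [PySem.Chars.splitOn.go, mySplit]
    | cons c rest =>
      by_cases hc : c = ' '
      · subst hc
        rw [PySem.Chars.splitOn.go]
        simp [List.isPrefixOf, ih rest [] _ (by simpa using Nat.le_of_succ_le_succ h), mySplit]
      · rw [PySem.Chars.splitOn.go]
        simp [List.isPrefixOf, Ne.symm hc, hc, mySplit,
          ih rest (c :: cur) acc (by simpa using Nat.le_of_succ_le_succ h)]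

theorem splitOn_eq (l : List Char) :
    PySem.Chars.splitOn l [' '] = mySplit l [] := by
  rw [PySem.Chars.splitOn]
  simpa using splitOn_go_eq (l.length + 1) l [] [] (by omega)

theorem mySplit_ne_nil (l cur : List Char) : mySplit l cur ≠ [] := by
  induction l generalizing cur with
  | nil => simp [mySplit]
  | cons c rest ih => by_cases hc : c = ' ' <;> simp [mySplit, hc, ih]

theorem foldl_scanB (l : List Char) (acc : List Char) (flag : Bool) :
    (l.foldl
      (fun (st : List Char × Bool) ch =>
        if ch = ' ' then (st.1 ++ [ch], true)
        else (st.1 ++ [if st.2 then PySem.Chars.upperChar ch else PySem.Chars.lowerChar ch], false))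
      (acc, flag)).1 = acc ++ scanB l flag := by
  induction l generalizing acc flag with
  | nil => simp [scanB]
  | cons c rest ih =>
    by_cases hc : c = ' ' <;> simp [scanB, hc, ih]

theorem cap_append_singleton (xs : List Char) (c : Char) (h : xs ≠ []) :
    pyCapitalize (xs ++ [c]) = pyCapitalize xs ++ [PySem.Chars.lowerChar c] := by
  cases xs with
  | nil => exact absurd rfl h
  | cons a t => simp [pyCapitalize, PySem.Chars.lower]

-- join with [' '] as head ++ flatMap
def joinSp : List (List Char) → List Char
  | [] => []
  | a :: rest => a ++ rest.flatMap (fun x => ' ' :: x)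

theorem joinSp_cons (a : List Char) (rest : List (List Char)) :
    joinSp (a :: rest) = a ++ rest.flatMap (fun x => ' ' :: x) := rfl

theorem join_eq_joinSp (parts : List (List Char)) :
    PySem.Chars.join [' '] parts = joinSp parts := by
  induction parts with
  | nil => simp [PySem.Chars.join_nil, joinSp]
  | cons a rest ih =>
    cases rest with
    | nil => simp [PySem.Chars.join_singleton, joinSp]
    | cons b r =>
      rw [PySem.Chars.join_cons_cons, ih]
      simp [joinSp_cons]

theorem flatMap_sp_cons (ps : List (List Char)) (hps : ps ≠ []) :
    ps.flatMap (fun x => ' ' :: x) = ' ' :: joinSp ps := by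
  cases ps with
  | nil => exact absurd rfl hps
  | cons a r => simp [joinSp_cons]

theorem main_scan (l : List Char) :
    (∀ cur, cur ≠ [] → joinSp ((mySplit l cur).map pyCapitalize)
        = pyCapitalize cur.reverse ++ scanB l false)
    ∧ joinSp ((mySplit l []).map pyCapitalize) = scanB l true := by
  induction l with
  | nil =>
    refine ⟨fun cur _ => ?_, ?_⟩
    · simp [mySplit, joinSp_cons, scanB]
    · simp [mySplit, joinSp_cons, scanB, pyCapitalize]
  | cons c rest ih =>
    have hne : (mySplit rest []).map pyCapitalize ≠ [] := by simp [mySplit_ne_nil]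
    refine ⟨fun cur hcur => ?_, ?_⟩
    · by_cases hc : c = ' '
      · subst hc
        simp [mySplit, scanB, joinSp_cons, flatMap_sp_cons _ hne, ih.2]
      · simp only [mySplit, scanB, if_neg hc]
        rw [ih.1 (c :: cur) (by simp)]
        rw [List.reverse_cons, cap_append_singleton _ _ (by simpa using hcur)]
        simp
    · by_cases hc : c = ' '
      · subst hc
        simp [mySplit, scanB, joinSp_cons, flatMap_sp_cons _ hne, ih.2, pyCapitalize]
      · simp only [mySplit, scanB, if_neg hc]
        rw [ih.1 [c] (by simp)]
        simp [pyCapitalize, PySem.Chars.lower]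

-- ===== VERDICT (by name: the statement is the Claim_ definition above) =====
theorem clean_log_spec : Claim_equal_clean_log := by
  intro text _
  unfold Spec_clean_log clean_log clean_log_alt
  dsimp only
  rw [splitOn_eq, PySem.List.foldl_append_singleton_eq_map]
  have hmap : (PySem.List.pyRange 0 (PySem.List.len (mySplit (PySem.Chars.replace text.toList ['_'] [' ']) []))).map
      (fun i => pyCapitalize (PySem.List.pyGetD (mySplit (PySem.Chars.replace text.toList ['_'] [' ']) []) i []))
      = (mySplit (PySem.Chars.replace text.toList ['_'] [' ']) []).map pyCapitalize := by
    conv_rhs => rw [← PySem.List.map_pyGetD_pyRange_zero (mySplit (PySem.Chars.replace text.toList ['_'] [' ']) []) []]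
    rw [List.map_map]
    rfl
  simp only [List.nil_append, hmap]
  rw [join_eq_joinSp, (main_scan _).2, foldl_scanB]
  simp
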